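-- pv_equiv track=rewrite | github.com/AntnvSergey/EpamPython2019 | 01-Data-Structures/hw/sticks/parser.py | find_most_active_commentator
-- ===== SOURCE A (Python) =====
-- def find_most_active_commentator(data):
--     commentators_dict = {}
--     for i, value in enumerate(data):
--         if value['taster_name'] in commentators_dict:
--             commentators_dict[value['taster_name']] += 1
--         else:
--             if value['taster_name']:
--                 commentators_dict[value['taster_name']] = 1
--     max_comments = 0
--     commentators = []
--     for key in commentators_dict:
--         if commentators_dict[key] > max_comments:
--             max_comments = commentators_dict[key]
--             commentators = []
--             commentators.append(key)
--         elif commentators_dict[key] == max_comments: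
--             commentators.append(key)
--     return commentators, max_comments
-- ===== SOURCE B (Python) =====
-- def find_most_active_commentator(data):
--     names = [row['taster_name'] for row in data if row['taster_name']]
--     best, winners = 0, set()
--     run, prev = 0, None
--     for x in sorted(names):
--         run = run + 1 if x == prev else 1
--         prev = x
--         if run > best:
--             best, winners = run, {x}
--         elif run == best:
--             winners.add(x)
--     out, seen = [], set()
--     for n in names:
--         if n in winners and n not in seen:
--             seen.add(n)
--             out.append(n)
--     return out, best
-- ===== Notes on version B (the rewrite author's own statement) =====
-- stated objective: alternative
-- what changed: A counts names into a dict and scans the dict with a running max that rebuilds the tie list; B sorts the truthy names, finds the longest run(s) of equal names in the sorted list with one run-length scan into a winner set, then restores first-occurrence order with a final pass over the original names.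
import Mathlib
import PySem

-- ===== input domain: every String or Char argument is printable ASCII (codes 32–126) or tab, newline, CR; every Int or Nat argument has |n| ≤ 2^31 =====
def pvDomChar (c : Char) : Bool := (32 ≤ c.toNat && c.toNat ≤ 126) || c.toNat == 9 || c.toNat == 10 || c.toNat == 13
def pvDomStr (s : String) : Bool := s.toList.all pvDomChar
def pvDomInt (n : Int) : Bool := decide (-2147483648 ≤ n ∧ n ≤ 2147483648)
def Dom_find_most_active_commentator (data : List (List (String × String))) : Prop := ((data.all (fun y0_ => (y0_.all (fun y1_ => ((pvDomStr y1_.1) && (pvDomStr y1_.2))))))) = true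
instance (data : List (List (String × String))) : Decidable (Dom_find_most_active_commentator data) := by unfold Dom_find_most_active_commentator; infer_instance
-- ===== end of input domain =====

-- B replaces A's dict counting + running-max dict scan by sorting the truthy names, finding the
-- longest equal-run(s) of the sorted list, and restoring first-occurrence order in a final pass.

-- ===== PORT A =====
-- value['taster_name']: first match in the row (a Python dict); a missing key is a KeyError,
-- excluded by Pre_, so the getD "" default is never reached on admitted inputs.
def pvTasterName (row : List (String × String)) : String :=
  ((PySem.Dict.mk row).get? "taster_name").getD ""

-- the body of A's first loop
def pvStepA (cd : PySem.Dict String Int) (row : List (String × String)) : PySem.Dict String Int :=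
  let name := pvTasterName row
  if cd.contains name then cd.modify name 0 (· + 1)
  else if name ≠ "" then cd.insert name 1
  else cd

def find_most_active_commentator (data : List (List (String × String))) : List String × Int :=
  let d := data.foldl pvStepA PySem.Dict.empty
  d.keys.foldl (fun acc k =>
    if d.getD k 0 > acc.2 then ([k], d.getD k 0)
    else if d.getD k 0 = acc.2 then (acc.1 ++ [k], acc.2)
    else acc) ([], 0)

-- ===== PORT B =====
-- the body of B's loop over the sorted names: state is (best, winners, run, prev)
def pvScanStep (st : Int × PySem.Set String × Int × Option String) (x : String) :
    Int × PySem.Set String × Int × Option String :=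
  let run : Int := if st.2.2.2 = some x then st.2.2.1 + 1 else 1
  if run > st.1 then (run, PySem.Set.ofList [x], run, some x)
  else if run = st.1 then (st.1, PySem.Set.add st.2.1 x, run, some x)
  else (st.1, st.2.1, run, some x)

-- the body of B's final loop: state is (out, seen)
def pvPickStep (w : PySem.Set String) (acc : List String × PySem.Set String) (n : String) :
    List String × PySem.Set String :=
  if w.contains n && !(acc.2.contains n) then (acc.1 ++ [n], PySem.Set.add acc.2 n) else acc

def find_most_active_commentator_alt (data : List (List (String × String))) : List String × Int :=
  let names := (data.map pvTasterName).filter (fun n => n != "")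
  let st := (PySem.List.sorted names (fun x => x) false).foldl pvScanStep
              (0, PySem.Set.empty, 0, none)
  let fin := names.foldl (pvPickStep st.2.1) ([], PySem.Set.empty)
  (fin.1, st.1)

-- ===== PRECONDITION & SPEC =====
-- Pre_ excludes exactly the rows without a 'taster_name' key, on which A (and B) raise KeyError.
def Pre_find_most_active_commentator (data : List (List (String × String))) : Prop :=
  (data.all (fun row => row.any (fun p => p.1 == "taster_name"))) = true
instance (data : List (List (String × String))) : Decidable (Pre_find_most_active_commentator data) := by unfold Pre_find_most_active_commentator; infer_instance
def pvWitness_find_most_active_commentator : (List (List (String × String))) :=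
  [[("taster_name", "bob")], [("taster_name", "amy"), ("points", "90")], [("taster_name", "bob")]]

def Spec_find_most_active_commentator (data : List (List (String × String))) (out : List String × Int) : Prop := out = find_most_active_commentator_alt data
instance (data : List (List (String × String))) (out : List String × Int) : Decidable (Spec_find_most_active_commentator data out) := by unfold Spec_find_most_active_commentator; infer_instance

-- ===== CLAIM (what is proved, stated in full; the proofs are below) =====
def Claim_equal_find_most_active_commentator : Prop := ∀ (data : List (List (String × String))), Dom_find_most_active_commentator data → Pre_find_most_active_commentator data → Spec_find_most_active_commentator data (find_most_active_commentator data)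

-- ===== LEMMAS AND PROOFS =====

-- A's counting loop is Counter(truthy names)
lemma pv_build_counter (data : List (List (String × String))) (d : PySem.Dict String Int)
    (h : d.contains "" = false) :
    data.foldl pvStepA d
      = ((data.map pvTasterName).filter (fun n => n != "")).foldl
          (fun d x => d.modify x 0 (· + 1)) d := by
  induction data generalizing d with
  | nil => rfl
  | cons row t ih =>
    simp only [List.map_cons, List.foldl_cons]
    by_cases hn : pvTasterName row = ""
    · rw [List.filter_cons_of_neg (by simp [hn])]
      have hstep : pvStepA d row = d := by
        unfold pvStepA
        simp only [hn, h]
        simp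
      rw [hstep]
      exact ih d h
    · rw [List.filter_cons_of_pos (by simp [hn]), List.foldl_cons]
      have hstep : pvStepA d row = d.modify (pvTasterName row) 0 (· + 1) := by
        unfold pvStepA
        by_cases hc : d.contains (pvTasterName row)
        · simp [hc]
        · simp only [Bool.not_eq_true] at hc
          simp only [hc, PySem.Dict.modify]
          rw [PySem.Dict.getD_of_not_contains d 0 hc]
          simp [hn]
      rw [hstep]
      refine ih _ ?_
      rw [PySem.Dict.contains_modify]
      simp [h]
      exact fun e => hn e

-- A's second loop, characterised as max + filter over the (key, count) pairs
lemma pv_scan (l : List (String × Int)) (acc : List String) (mx : Int) :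
    l.foldl (fun a p => if p.2 > a.2 then ([p.1], p.2)
                        else if p.2 = a.2 then (a.1 ++ [p.1], a.2) else a) (acc, mx)
    = ((if l.foldl (fun m p => max m p.2) mx = mx then acc else [])
        ++ (l.filter (fun p => p.2 == l.foldl (fun m p => max m p.2) mx)).map (·.1),
       l.foldl (fun m p => max m p.2) mx) := by
  induction l generalizing acc mx with
  | nil => simp
  | cons x t ih =>
    simp only [List.foldl_cons, List.filter_cons]
    by_cases h1 : x.2 > mx
    · have hmx : max mx x.2 = x.2 := max_eq_right (le_of_lt h1)
      simp only [if_pos h1, hmx, ih]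
      have hxle : x.2 ≤ t.foldl (fun m p => max m p.2) x.2 :=
        (PySem.List.le_foldl_max_int t (fun p => p.2) x.2).1
      set M := t.foldl (fun m p => max m p.2) x.2 with hM
      have hMne : M ≠ mx := by omega
      rw [if_neg hMne]
      by_cases h2 : M = x.2
      · simp [h2]
      · have hb : (x.2 == M) = false := by simp; omega
        simp [hb, h2]
    · have hmx : max mx x.2 = mx := max_eq_left (by omega)
      simp only [if_neg h1, hmx, ih]
      set M := t.foldl (fun m p => max m p.2) mx with hM
      have hle : mx ≤ M := (PySem.List.le_foldl_max_int t (fun p => p.2) mx).1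
      by_cases h2 : x.2 = mx
      · simp only [if_pos h2]
        by_cases h3 : M = mx
        · have hb : (x.2 == M) = true := by simp [h2, h3]
          rw [← hM]
          simp [h3, h2]
        · have hb : (x.2 == M) = false := by simp; omega
          rw [← hM]
          simp [hb, h3]
      · simp only [if_neg h2]
        have hb : (x.2 == M) = false := by simp; omega
        rw [← hM]
        simp [hb]

-- B's run scan over a sorted list: best = the maximal multiplicity, winners = its attainers
lemma pv_scan_inv (rest p : List String) (best run : Int) (w : PySem.Set String)
    (prev : Option String)
    (hs : (p ++ rest).Pairwise (fun a b => a ≤ b))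
    (hprev : ∀ u, prev = some u → u ∈ p ∧ run = (p.count u : Int))
    (hpub : ∀ v ∈ p, ∃ u, prev = some u ∧ v ≤ u)
    (hub : ∀ v ∈ p, (p.count v : Int) ≤ best)
    (hnil : p = [] → best = 0)
    (hatt : p ≠ [] → ∃ v ∈ p, (p.count v : Int) = best)
    (hw : ∀ v, v ∈ w ↔ v ∈ p ∧ (p.count v : Int) = best) :
    (∀ v ∈ p ++ rest, ((p ++ rest).count v : Int) ≤ (rest.foldl pvScanStep (best, w, run, prev)).1)
    ∧ (p ++ rest = [] → (rest.foldl pvScanStep (best, w, run, prev)).1 = 0)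
    ∧ (p ++ rest ≠ [] → ∃ v ∈ p ++ rest,
        ((p ++ rest).count v : Int) = (rest.foldl pvScanStep (best, w, run, prev)).1)
    ∧ (∀ v, v ∈ (rest.foldl pvScanStep (best, w, run, prev)).2.1 ↔
        v ∈ p ++ rest ∧ ((p ++ rest).count v : Int) = (rest.foldl pvScanStep (best, w, run, prev)).1) := by
  induction rest generalizing p best run w prev with
  | nil =>
    simp only [List.foldl_nil, List.append_nil]
    exact ⟨hub, hnil, hatt, hw⟩
  | cons x xs ih =>
    rw [List.append_cons] at hs ⊢
    rw [List.foldl_cons]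
    have hall : ∀ a ∈ p, a ≤ x := by
      intro a ha
      exact (List.pairwise_append.mp (List.pairwise_append.mp hs).1).2.2 a ha x (by simp)
    have hs' : ((p ++ [x]) ++ xs).Pairwise (fun a b => a ≤ b) := hs
    -- the new run value
    have hcx : ((p ++ [x]).count x : Int) = (if prev = some x then run + 1 else 1)
        ∧ (p.count x : Int) = (if prev = some x then run + 1 else 1) - 1 := by
      by_cases hpx : prev = some x
      · obtain ⟨hxp, hrunx⟩ := hprev x hpx
        simp only [if_pos hpx, List.count_append, List.count_singleton, beq_self_eq_true,
          if_true]
        push_cast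
        omega
      · have hxnp : x ∉ p := by
          intro hm
          obtain ⟨u, hu, hxu⟩ := hpub x hm
          obtain ⟨hup, _⟩ := hprev u hu
          have : u = x := le_antisymm (hall u hup) hxu
          exact hpx (by rw [hu, this])
        have h0 : p.count x = 0 := List.count_eq_zero_of_not_mem hxnp
        simp only [if_neg hpx, List.count_append, List.count_singleton, h0]
        norm_num
    set rdef : Int := if prev = some x then run + 1 else 1 with hrdef
    have hr1 : 1 ≤ rdef := by
      obtain ⟨h1, h2⟩ := hcx
      have h0 : (0:Int) ≤ (p.count x : Int) := by positivity
      omega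
    have hmemp : ∀ v, v ∈ p ++ [x] → v ≠ x → v ∈ p := by
      intro v hv hvx
      rcases List.mem_append.mp hv with h | h
      · exact h
      · exact absurd (by simpa using h) hvx
    have hcnto : ∀ v, v ≠ x → (p ++ [x]).count v = p.count v := by
      intro v hv
      have h0 : List.count v [x] = 0 := List.count_eq_zero_of_not_mem (by simpa using hv)
      rw [List.count_append, h0]
      omega
    have hprev' : ∀ u, (some x : Option String) = some u →
        u ∈ p ++ [x] ∧ rdef = ((p ++ [x]).count u : Int) := by
      intro u hu
      have he : u = x := (Option.some.inj hu).symm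
      subst he
      exact ⟨by simp, hcx.1.symm⟩
    have hpub' : ∀ v ∈ p ++ [x], ∃ u, (some x : Option String) = some u ∧ v ≤ u := by
      intro v hv
      rcases List.mem_append.mp hv with hvp | hvx
      · exact ⟨x, rfl, hall v hvp⟩
      · simp only [List.mem_singleton] at hvx
        exact ⟨x, rfl, le_of_eq hvx⟩
    have hnil' : p ++ [x] = [] → (0:Int) = 0 := fun _ => rfl
    have hstep : pvScanStep (best, w, run, prev) x
        = if rdef > best then (rdef, PySem.Set.ofList [x], rdef, some x)
          else if rdef = best then (best, PySem.Set.add w x, rdef, some x)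
          else (best, w, rdef, some x) := rfl
    rw [hstep]
    split_ifs with hgt heqb
    · -- new strict maximum: winners reset to {x}
      refine ih (p ++ [x]) rdef rdef (PySem.Set.ofList [x]) (some x) hs'
        hprev' hpub' ?_ (by intro h; simp at h) ?_ ?_
      · intro v hv
        by_cases hvx : v = x
        · subst hvx; rw [hcx.1]
        · rw [hcnto v hvx]
          have := hub v (hmemp v hv hvx)
          omega
      · intro _
        exact ⟨x, by simp, hcx.1⟩
      · intro v
        have hofl : PySem.Set.ofList [x] = [x] := rfl
        rw [hofl]
        constructor
        · intro hv
          simp only [List.mem_singleton] at hv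
          subst hv
          exact ⟨by simp, hcx.1⟩
        · rintro ⟨hv, hc⟩
          by_cases hvx : v = x
          · simp [hvx]
          · exfalso
            rw [hcnto v hvx] at hc
            have := hub v (hmemp v hv hvx)
            omega
    · -- run ties the maximum: x joins the winners
      refine ih (p ++ [x]) best rdef (PySem.Set.add w x) (some x) hs'
        hprev' hpub' ?_ (by intro h; simp at h) ?_ ?_
      · intro v hv
        by_cases hvx : v = x
        · subst hvx; rw [hcx.1]; omega
        · rw [hcnto v hvx]
          exact hub v (hmemp v hv hvx)
      · intro _
        exact ⟨x, by simp, by rw [hcx.1]; omega⟩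
      · intro v
        have hmem : v ∈ PySem.Set.add w x ↔ v ∈ w ∨ v = x := by
          unfold PySem.Set.add
          by_cases hcw : w.contains x = true
          · rw [if_pos hcw]
            have hxw : x ∈ w := by simpa using hcw
            constructor
            · exact Or.inl
            · rintro (h | h)
              · exact h
              · rw [h]; exact hxw
          · rw [if_neg hcw]
            simp
        rw [hmem]
        constructor
        · rintro (hv | hv)
          · obtain ⟨hvp, hvc⟩ := (hw v).mp hv
            have hvx : v ≠ x := by
              intro he
              subst he
              have := hcx.2
              omega
            rw [hcnto v hvx]
            exact ⟨by simp [hvp], hvc⟩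
          · subst hv
            exact ⟨by simp, by rw [hcx.1]; omega⟩
        · rintro ⟨hv, hc⟩
          by_cases hvx : v = x
          · exact Or.inr hvx
          · rw [hcnto v hvx] at hc
            exact Or.inl ((hw v).mpr ⟨hmemp v hv hvx, hc⟩)
    · -- run below the maximum: nothing changes
      have hlt : rdef < best := by omega
      refine ih (p ++ [x]) best rdef w (some x) hs'
        hprev' hpub' ?_ (by intro h; simp at h) ?_ ?_
      · intro v hv
        by_cases hvx : v = x
        · subst hvx; rw [hcx.1]; omega
        · rw [hcnto v hvx]
          exact hub v (hmemp v hv hvx)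
      · intro _
        have hpne : p ≠ [] := by
          intro he
          have := hnil he
          omega
        obtain ⟨v, hvp, hvc⟩ := hatt hpne
        have hvx : v ≠ x := by
          intro he
          subst he
          have := hcx.2
          omega
        exact ⟨v, by simp [hvp], by rw [hcnto v hvx]; exact hvc⟩
      · intro v
        constructor
        · intro hv
          obtain ⟨hvp, hvc⟩ := (hw v).mp hv
          have hvx : v ≠ x := by
            intro he
            subst he
            have := hcx.2
            omega
          rw [hcnto v hvx]
          exact ⟨by simp [hvp], hvc⟩
        · rintro ⟨hv, hc⟩
          by_cases hvx : v = x
          · exfalso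
            subst hvx
            rw [hcx.1] at hc
            omega
          · rw [hcnto v hvx] at hc
            exact (hw v).mpr ⟨hmemp v hv hvx, hc⟩

-- B's final loop with a seen-set in sync with out is Set.update on the winner-filtered list
lemma pv_pick (w : PySem.Set String) (l : List String) (o : List String) (s : PySem.Set String)
    (hsync : ∀ v, s.contains v = o.contains v) :
    (l.foldl (pvPickStep w) (o, s)).1
      = (l.filter (fun n => w.contains n)).foldl PySem.Set.add o := by
  induction l generalizing o s with
  | nil => rfl
  | cons n t ih =>
    simp only [List.foldl_cons, List.filter_cons]
    by_cases hwc : w.contains n = true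
    · simp only [hwc, if_pos trivial, List.foldl_cons]
      by_cases hsc : s.contains n = true
      · have hoc : o.contains n = true := by rw [← hsync]; exact hsc
        have hstep : pvPickStep w (o, s) n = (o, s) := by
          unfold pvPickStep; simp [hwc, hsc]
          intro _; simpa using hsc
        have hadd : PySem.Set.add o n = o := by
          simp [PySem.Set.add, hoc]
          simpa using hoc
        rw [hstep, hadd]
        exact ih o s hsync
      · have hoc : o.contains n = false := by rw [← hsync]; simpa using hsc
        have hstep : pvPickStep w (o, s) n = (o ++ [n], PySem.Set.add s n) := by
          unfold pvPickStep; simp [hwc, hsc]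
          constructor
          · simpa using hwc
          · simpa using hsc
        have hadd : PySem.Set.add o n = o ++ [n] := by
          simp [PySem.Set.add, hoc]
          simpa using hoc
        rw [hstep, hadd]
        refine ih _ _ ?_
        intro v
        have : PySem.Set.add s n = s ++ [n] := by
          simp [PySem.Set.add, hsc]
          simpa using hsc
        rw [this]
        have hv := hsync v
        simp only [List.contains_append]
        simp at hv ⊢
        simp [hv]
    · have hwc' : w.contains n = false := by simpa using hwc
      rw [if_neg (by simpa using hwc')]
      have hstep : pvPickStep w (o, s) n = (o, s) := by
        unfold pvPickStep
        have : (w.contains n && !(s.contains n)) = false := by rw [hwc']; rfl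
        rw [this]
        simpa using hwc'
      rw [hstep]
      exact ih o s hsync

-- first-occurrence dedup commutes with filter
lemma pv_ofList_filter (p : String → Bool) (l : List String) :
    PySem.Set.ofList (l.filter p) = (PySem.Set.ofList l).filter p := by
  have aux : ∀ (l acc : List String),
      ((l.filter p).foldl PySem.Set.add (acc.filter p)) = (l.foldl PySem.Set.add acc).filter p := by
    intro l
    induction l with
    | nil => intro acc; rfl
    | cons x t ih =>
      intro acc
      by_cases hp : p x = true
      · rw [List.filter_cons_of_pos hp]
        simp only [List.foldl_cons]
        have hadd : PySem.Set.add (acc.filter p) x = (PySem.Set.add acc x).filter p := by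
          by_cases hm : x ∈ acc
          · simp [PySem.Set.add, hm, hp]
          · simp [PySem.Set.add, hm, hp, List.filter_append]
        rw [hadd]
        exact ih _
      · rw [List.filter_cons_of_neg (by simp [hp])]
        simp only [List.foldl_cons]
        have heq : (PySem.Set.add acc x).filter p = acc.filter p := by
          by_cases hm : x ∈ acc
          · simp [PySem.Set.add, hm]
          · simp [PySem.Set.add, hm, List.filter_append, hp]
        rw [← heq]
        exact ih _
  have h0 := aux l []
  simpa [PySem.Set.ofList] using h0

-- ===== VERDICT (by name: the statement is the Claim_ definition above) =====
theorem find_most_active_commentator_spec : Claim_equal_find_most_active_commentator := by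
  intro data _hdom _hpre
  unfold Spec_find_most_active_commentator find_most_active_commentator
  rw [pv_build_counter data PySem.Dict.empty (by simp)]
  set ns := (data.map pvTasterName).filter (fun n => n != "") with hns
  have halt : find_most_active_commentator_alt data
      = ((ns.foldl (pvPickStep (((PySem.List.sorted ns (fun x => x) false).foldl pvScanStep
            (0, PySem.Set.empty, 0, none)).2.1)) ([], PySem.Set.empty)).1,
         ((PySem.List.sorted ns (fun x => x) false).foldl pvScanStep
            (0, PySem.Set.empty, 0, none)).1) := rfl
  rw [halt]
  have hd : ns.foldl (fun d x => d.modify x 0 (· + 1)) PySem.Dict.empty = PySem.Dict.counter ns :=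
    (PySem.Dict.counter_eq_foldl ns).symm
  rw [hd]
  set c := PySem.Dict.counter ns with hc
  -- A's second loop over the keys is a loop over the items
  have hitems : c.items = (PySem.Set.ofList ns).map (fun k => (k, (ns.count k : Int))) :=
    PySem.Dict.items_counter ns
  have hkeys : c.keys = PySem.Set.ofList ns := PySem.Dict.keys_counter ns
  have hnd : c.keys.Nodup := PySem.Dict.nodup_keys_counter ns
  have hfoldA : c.keys.foldl (fun acc k =>
      if c.getD k 0 > acc.2 then ([k], c.getD k 0)
      else if c.getD k 0 = acc.2 then (acc.1 ++ [k], acc.2)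
      else acc) ([], 0)
      = c.items.foldl (fun a p => if p.2 > a.2 then ([p.1], p.2)
                        else if p.2 = a.2 then (a.1 ++ [p.1], a.2) else a) ([], 0) := by
    rw [PySem.Dict.items_eq_map_keys c hnd 0, List.foldl_map]
  rw [hfoldA, pv_scan]
  set M := c.items.foldl (fun m p => max m p.2) 0 with hM
  -- the A-side value
  have hA1 : ((if M = 0 then ([] : List String) else []) ++
      (c.items.filter (fun p => p.2 == M)).map (·.1))
      = (PySem.Set.ofList ns).filter (fun k => (ns.count k : Int) == M) := by
    rw [hitems, List.filter_map, List.map_map]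
    simp [Function.comp_def]
  have hMfold : M = ((PySem.Set.ofList ns).map (fun k => (ns.count k : Int))).foldl max 0 := by
    rw [hM, hitems, List.foldl_map, List.foldl_map]
  -- the B-side scan
  set s := PySem.List.sorted ns (fun x => x) false with hsrt
  have hperm : s.Perm ns := PySem.List.sorted_perm ns (fun x => x) false
  have hpair : (([] : List String) ++ s).Pairwise (fun a b => a ≤ b) := by
    simpa using PySem.List.sorted_pairwise ns (fun x => x)
  have hB := pv_scan_inv s [] 0 0 PySem.Set.empty none hpair
    (fun u hu => by simp at hu) (fun v hv => by simp at hv) (fun v hv => by simp at hv)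
    (fun _ => rfl) (fun h => absurd rfl h) (fun v => by simp [PySem.Set.empty])
  simp only [List.nil_append] at hB
  obtain ⟨hub, hnil, hatt, hw⟩ := hB
  set st := s.foldl pvScanStep (0, PySem.Set.empty, 0, none) with hst
  -- best = M
  have hbestM : st.1 = M := by
    by_cases hemp : ns = []
    · have hse : s = [] := by
        rw [hsrt]
        exact (PySem.List.sorted_eq_nil_iff ns (fun x => x) false).mpr hemp
      have h1 : st.1 = 0 := by rw [hst, hse]; rfl
      have h2 : M = 0 := by
        rw [hMfold, hemp]
        rfl
      rw [h1, h2]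
    · have hsne : s ≠ [] := by
        intro hse
        exact hemp (List.Perm.eq_nil (hperm.symm.trans (hse ▸ List.Perm.refl _)))
      obtain ⟨v, hvs, hvc⟩ := hatt hsne
      have hvns : v ∈ ns := hperm.mem_iff.mp hvs
      have hvof : v ∈ PySem.Set.ofList ns := (PySem.Set.mem_ofList ns v).mpr hvns
      -- st.1 ≤ M
      have h1 : st.1 ≤ M := by
        rw [← hvc, hperm.count_eq v, hMfold]
        exact (PySem.List.le_foldl_max ((PySem.Set.ofList ns).map (fun k => (ns.count k : Int))) 0).2
          _ (List.mem_map_of_mem hvof)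
      -- M ≤ st.1
      have h2 : M ≤ st.1 := by
        rcases PySem.List.foldl_max_mem ((PySem.Set.ofList ns).map (fun k => (ns.count k : Int))) 0 with h0 | hmem
        · rw [hMfold, h0]
          rw [← hvc]
          positivity
        · obtain ⟨k, hk, hkeq⟩ := List.mem_map.mp hmem
          have hkns : k ∈ ns := (PySem.Set.mem_ofList ns k).mp hk
          have hks : k ∈ s := hperm.mem_iff.mpr hkns
          have hkub := hub k hks
          rw [hperm.count_eq k] at hkub
          rw [hMfold, ← hkeq]
          exact hkub
      omega
  -- the B-side pick loop
  have hpick : (ns.foldl (pvPickStep st.2.1) ([], PySem.Set.empty)).1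
      = (PySem.Set.ofList ns).filter (fun n => st.2.1.contains n) := by
    rw [pv_pick st.2.1 ns [] PySem.Set.empty (fun v => rfl)]
    have : (ns.filter (fun n => st.2.1.contains n)).foldl PySem.Set.add []
        = PySem.Set.ofList (ns.filter (fun n => st.2.1.contains n)) := rfl
    rw [this, pv_ofList_filter]
  -- winners test = count == M on the distinct names
  have hfc : (PySem.Set.ofList ns).filter (fun n => st.2.1.contains n)
      = (PySem.Set.ofList ns).filter (fun k => (ns.count k : Int) == M) := by
    apply List.filter_congr
    intro k hk
    have hkns : k ∈ ns := (PySem.Set.mem_ofList ns k).mp hk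
    have hks : k ∈ s := hperm.mem_iff.mpr hkns
    have hwk := hw k
    rw [hperm.count_eq k] at hwk
    by_cases hkM : (ns.count k : Int) = M
    · have : k ∈ st.2.1 := hwk.mpr ⟨hks, by rw [hbestM]; exact hkM⟩
      simp [List.contains_iff_mem, this, hkM]
    · have : k ∉ st.2.1 := by
        intro hmem
        exact hkM (by rw [← hbestM]; exact (hwk.mp hmem).2)
      simp [List.contains_iff_mem, this, hkM]
  rw [hpick, hfc, hA1, hbestM]
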